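-- pv_equiv track=rewrite | github.com/ruihanzou/leetcode-top-150 | skill-days/day21-graph-trie/python/433_min_genetic_mutation.py | minMutation_bfs
-- ===== SOURCE A (Python) =====
-- from typing import List
-- from collections import deque
--
-- def minMutation_bfs(startGene: str, endGene: str, bank: List[str]) -> int:
--     bank_set = set(bank)
--     if endGene not in bank_set:
--         return -1
--
--     visited = {startGene}
--     queue = deque([(startGene, 0)])
--     genes = ['A', 'C', 'G', 'T']
--
--     while queue:
--         current, steps = queue.popleft()
--         if current == endGene:
--             return steps
--
--         for i in range(len(current)):
--             for g in genes:
--                 if g == current[i]: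
--                     continue
--                 mutation = current[:i] + g + current[i + 1:]
--                 if mutation in bank_set and mutation not in visited:
--                     visited.add(mutation)
--                     queue.append((mutation, steps + 1))
--
--     return -1
-- ===== SOURCE B (Python) =====
-- def minMutation_bfs(startGene: str, endGene: str, bank):
--     bank_set = set(bank)
--     if endGene not in bank_set:
--         return -1
--
--     # Precompute a neighbor table once: for every node (startGene plus the
--     # distinct bank genes), the bank genes reachable by one mutation.
--     nodes = list(dict.fromkeys([startGene] + bank))
--     adj = {}
--     for u in nodes:
--         lst = []
--         for i in range(len(u)):
--             for g in "ACGT":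
--                 if g != u[i]:
--                     m = u[:i] + g + u[i + 1:]
--                     if m in bank_set:
--                         lst.append(m)
--         adj[u] = lst
--
--     # Level-synchronous BFS over the precomputed table.
--     visited = {startGene}
--     frontier = [startGene]
--     steps = 0
--     while frontier:
--         if endGene in frontier:
--             return steps
--         nxt = []
--         for u in frontier:
--             for m in adj[u]:
--                 if m not in visited:
--                     visited.add(m)
--                     nxt.append(m)
--         frontier = nxt
--         steps += 1
--     return -1
-- ===== Notes on version B (the rewrite author's own statement) =====
-- stated objective: alternative
-- what changed: B precomputes a neighbor table (dict over startGene plus the distinct bank genes) once and runs a level-synchronous BFS over that table with a whole-frontier membership test, instead of A's FIFO deque of (gene, steps) pairs that regenerates the 4*len candidate strings at every dequeue.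
import Mathlib
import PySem

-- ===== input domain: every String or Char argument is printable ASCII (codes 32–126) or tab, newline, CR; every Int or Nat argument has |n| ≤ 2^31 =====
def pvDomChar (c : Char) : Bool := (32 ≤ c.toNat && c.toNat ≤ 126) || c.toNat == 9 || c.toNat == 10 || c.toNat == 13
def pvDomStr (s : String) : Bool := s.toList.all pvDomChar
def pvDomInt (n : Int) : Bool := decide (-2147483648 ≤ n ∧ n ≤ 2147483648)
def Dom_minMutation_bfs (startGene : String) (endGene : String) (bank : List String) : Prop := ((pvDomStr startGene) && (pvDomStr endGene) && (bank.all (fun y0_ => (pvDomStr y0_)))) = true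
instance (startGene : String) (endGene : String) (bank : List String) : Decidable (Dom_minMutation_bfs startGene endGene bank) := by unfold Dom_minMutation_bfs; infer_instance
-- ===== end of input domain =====

-- B re-organises A's BFS: it precomputes a neighbor table (dict) over the distinct
-- genes once and then runs a level-synchronous BFS over that table, instead of A's
-- FIFO queue of (gene, steps) pairs that regenerates the 4·len candidate strings at
-- every dequeue.  Objective: alternative (same asymptotic cost; return values proved
-- equal on all inputs).  Both loops are ported with a fuel counter bank.length + 2,
-- which the proofs show is never exhausted before the Python loop would stop.

-- ===== PORT A =====
-- current[:i] + g + current[i+1:]  (exact: Python slices with nonnegative bounds clamp like drop/take)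
def mmMut (cs : List Char) (i : Nat) (g : Char) : String :=
  String.ofList (PySem.List.slice cs none (some (i : Int)) ++ [g] ++
    PySem.List.slice cs (some ((i : Int) + 1)) none)

def mmGenes : List Char := ['A', 'C', 'G', 'T']

-- the body of A's while-loop after `current, steps = queue.popleft()`: the two nested
-- for-loops, mutating (visited, queue) — st.1 = visited, st.2 = the queue behind `current`
def mmExpandA (bankSet : List String) (cur : String) (steps : Int)
    (st : List String × List (String × Int)) : List String × List (String × Int) :=
  (List.range cur.toList.length).foldl (fun st i =>
    mmGenes.foldl (fun st g =>
      if g = cur.toList.getD i 'A' then st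
      else
        let m := mmMut cur.toList i g
        if m ∈ bankSet ∧ m ∉ st.1 then (PySem.Set.add st.1 m, st.2 ++ [(m, steps + 1)])
        else st) st) st

-- `while queue:` — fuel bank.length+2 (proved sufficient: each dequeue matches one enqueue,
-- and at most bank.length+1 genes are ever enqueued, each once)
def mmLoopA (endGene : String) (bankSet : List String) :
    Nat → List (String × Int) → List String → Int
  | 0, _, _ => -1
  | _ + 1, [], _ => -1
  | fuel + 1, (cur, steps) :: rest, visited =>
    if cur = endGene then steps
    else
      let st := mmExpandA bankSet cur steps (visited, rest)
      mmLoopA endGene bankSet fuel st.2 st.1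

def minMutation_bfs (startGene : String) (endGene : String) (bank : List String) : Int :=
  let bankSet : PySem.Set String := PySem.Set.ofList bank
  if endGene ∈ bankSet then
    mmLoopA endGene bankSet (bank.length + 2) [(startGene, 0)] [startGene]
  else -1

-- ===== PORT B =====
-- the bank genes one mutation away from u (positions left to right, genes "ACGT")
def mmNbrs (bankSet : List String) (u : String) : List String :=
  (List.range u.toList.length).foldl (fun acc i =>
    "ACGT".toList.foldl (fun acc g =>
      if g ≠ u.toList.getD i 'A' then
        (let m := mmMut u.toList i g
         if m ∈ bankSet then acc ++ [m] else acc)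
      else acc) acc) []

-- adj = {u: neighbors(u) for u in nodes}
def mmAdj (bankSet : List String) (nodes : List String) : PySem.Dict String (List String) :=
  nodes.foldl (fun d u => d.insert u (mmNbrs bankSet u)) PySem.Dict.empty

-- `for m in ms: if m not in visited: visited.add(m); nxt.append(m)` — st.1 = visited, st.2 = nxt
def mmVisFold (st : List String × List String) (ms : List String) : List String × List String :=
  ms.foldl (fun st m => if m ∉ st.1 then (PySem.Set.add st.1 m, st.2 ++ [m]) else st) st

-- `for u in frontier: for m in adj[u]: …`  (adj[u] is always present: u is startGene or a bank gene)
def mmLevel (adj : PySem.Dict String (List String)) (frontier : List String)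
    (st : List String × List String) : List String × List String :=
  frontier.foldl (fun st u => mmVisFold st (adj.getD u [])) st

-- `while frontier:` — same fuel bound, one unit per level
def mmLoopB (endGene : String) (adj : PySem.Dict String (List String)) :
    Nat → List String → List String → Int → Int
  | 0, _, _, _ => -1
  | _ + 1, [], _, _ => -1
  | fuel + 1, f :: fr, visited, steps =>
    if endGene ∈ f :: fr then steps
    else
      let st := mmLevel adj (f :: fr) (visited, [])
      mmLoopB endGene adj fuel st.2 st.1 (steps + 1)

def minMutation_bfs_alt (startGene : String) (endGene : String) (bank : List String) : Int :=
  let bankSet : PySem.Set String := PySem.Set.ofList bank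
  if endGene ∈ bankSet then
    let nodes := PySem.List.dedup (startGene :: bank)
    let adj := mmAdj bankSet nodes
    mmLoopB endGene adj (bank.length + 2) [startGene] [startGene] 0
  else -1

-- ===== PRECONDITION & SPEC =====
def Spec_minMutation_bfs (startGene : String) (endGene : String) (bank : List String) (out : Int) : Prop := out = minMutation_bfs_alt startGene endGene bank
instance (startGene : String) (endGene : String) (bank : List String) (out : Int) : Decidable (Spec_minMutation_bfs startGene endGene bank out) := by unfold Spec_minMutation_bfs; infer_instance

-- ===== CLAIM (what is proved, stated in full; the proofs are below) =====
def Claim_equal_minMutation_bfs : Prop := ∀ (startGene : String) (endGene : String) (bank : List String), Dom_minMutation_bfs startGene endGene bank → Spec_minMutation_bfs startGene endGene bank (minMutation_bfs startGene endGene bank)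

-- ===== LEMMAS AND PROOFS =====

-- proof-only abbreviations
def mmNodes (startGene : String) (bank : List String) : List String :=
  PySem.List.dedup (startGene :: bank)

-- number of bank genes not yet discovered
def mmUnd (bank v : List String) : Nat :=
  ((PySem.Set.ofList bank).filter (fun x => decide (x ∉ v))).length

-- the per-(i,g) candidate contribution, and the flat neighbor list
def mmGb (bankSet : List String) (cs : List Char) (i : Nat) (g : Char) : List String :=
  if g = cs.getD i 'A' then []
  else if mmMut cs i g ∈ bankSet then [mmMut cs i g] else []

def mmNbrL (bankSet : List String) (cs : List Char) : List String :=
  (List.range cs.length).flatMap (fun i => mmGenes.flatMap (mmGb bankSet cs i))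

-- mmVisFold: the nxt accumulator is append-only and independent of what it already holds
lemma mmVisFold_acc : ∀ (ms : List String) (st : List String × List String),
    mmVisFold st ms = ((mmVisFold (st.1, []) ms).1, st.2 ++ (mmVisFold (st.1, []) ms).2) := by
  intro ms
  induction ms with
  | nil => intro st; simp [mmVisFold]
  | cons m ms ih =>
    intro ⟨v, n⟩
    by_cases hm : m ∈ v
    · have e1 : mmVisFold (v, n) (m :: ms) = mmVisFold (v, n) ms := by simp [mmVisFold, hm]
      have e2 : mmVisFold (v, []) (m :: ms) = mmVisFold (v, []) ms := by simp [mmVisFold, hm]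
      rw [e1, e2]; exact ih (v, n)
    · have e1 : mmVisFold (v, n) (m :: ms) = mmVisFold (PySem.Set.add v m, n ++ [m]) ms := by
        simp [mmVisFold, hm]
      have e2 : mmVisFold (v, []) (m :: ms) = mmVisFold (PySem.Set.add v m, [m]) ms := by
        simp [mmVisFold, hm]
      rw [e1, e2, ih (PySem.Set.add v m, n ++ [m]), ih (PySem.Set.add v m, [m])]
      simp

lemma mmVisFold_append (st : List String × List String) (xs ys : List String) :
    mmVisFold st (xs ++ ys) = mmVisFold (mmVisFold st xs) ys := by
  simp [mmVisFold, List.foldl_append]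

-- generic: a fold whose every step behaves like filtering gb a through the visited set
-- equals one visited-filter pass over the concatenation of the gb a
lemma mmVisRel_fold {α : Type} (φ : String → String × Int)
    (FA : (List String × List (String × Int)) → α → List String × List (String × Int))
    (gb : α → List String)
    (h : ∀ (v : List String) (q : List (String × Int)) (a : α),
      FA (v, q) a = ((mmVisFold (v, []) (gb a)).1, q ++ ((mmVisFold (v, []) (gb a)).2).map φ)) :
    ∀ (L : List α) (v : List String) (q : List (String × Int)),
      L.foldl FA (v, q) = ((mmVisFold (v, []) (L.flatMap gb)).1,
        q ++ ((mmVisFold (v, []) (L.flatMap gb)).2).map φ) := by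
  intro L
  induction L with
  | nil => intro v q; simp [mmVisFold]
  | cons a L ih =>
    intro v q
    rw [List.foldl_cons, h v q a, ih, List.flatMap_cons, mmVisFold_append,
      mmVisFold_acc (L.flatMap gb) (mmVisFold (v, []) (gb a))]
    simp [List.map_append]

lemma mmNbrs_eq (bankSet : List String) (u : String) :
    mmNbrs bankSet u = mmNbrL bankSet u.toList := by
  unfold mmNbrs mmNbrL
  have hA : "ACGT".toList = mmGenes := rfl
  have hin : ∀ i : Nat, (fun (acc : List String) (g : Char) =>
      if g ≠ u.toList.getD i 'A' then
        (let m := mmMut u.toList i g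
         if m ∈ bankSet then acc ++ [m] else acc)
      else acc) = fun acc g => acc ++ mmGb bankSet u.toList i g := by
    intro i
    funext acc g
    simp only [mmGb]
    split_ifs <;> simp_all
  have hout : (fun (acc : List String) (i : Nat) =>
      mmGenes.foldl (fun acc g => acc ++ mmGb bankSet u.toList i g) acc) =
      fun acc i => acc ++ mmGenes.flatMap (mmGb bankSet u.toList i) := by
    funext acc i
    exact PySem.List.foldl_append_eq_flatMap _ _ _
  rw [hA]
  simp only [hin, hout]
  rw [PySem.List.foldl_append_eq_flatMap]
  simp

lemma mmNbrs_mem (bankSet : List String) (u : String) :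
    ∀ x ∈ mmNbrs bankSet u, x ∈ bankSet := by
  rw [mmNbrs_eq]
  intro x hx
  simp only [mmNbrL, List.mem_flatMap] at hx
  obtain ⟨i, _, g, _, hx⟩ := hx
  unfold mmGb at hx
  split_ifs at hx with h1 h2
  · simp at hx
  · rw [List.mem_singleton.mp hx]; exact h2
  · simp at hx

-- A's expansion of one node = filter its precomputed neighbor list through visited
lemma mmExpandA_eq (bankSet : List String) (cur : String) (steps : Int)
    (v : List String) (q : List (String × Int)) :
    mmExpandA bankSet cur steps (v, q) =
      ((mmVisFold (v, []) (mmNbrs bankSet cur)).1,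
        q ++ ((mmVisFold (v, []) (mmNbrs bankSet cur)).2).map (fun m => (m, steps + 1))) := by
  have hinner : ∀ i : Nat, ∀ (v : List String) (q : List (String × Int)) (g : Char),
      (if g = cur.toList.getD i 'A' then (v, q)
       else if mmMut cur.toList i g ∈ bankSet ∧ mmMut cur.toList i g ∉ v then
         (PySem.Set.add v (mmMut cur.toList i g), q ++ [(mmMut cur.toList i g, steps + 1)])
       else (v, q)) =
      ((mmVisFold (v, []) (mmGb bankSet cur.toList i g)).1,
        q ++ ((mmVisFold (v, []) (mmGb bankSet cur.toList i g)).2).map (fun m => (m, steps + 1))) := by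
    intro i v q g
    by_cases h1 : g = cur.toList.getD i 'A'
    · rw [if_pos h1]; simp only [mmGb, if_pos h1]; simp [mmVisFold]
    · rw [if_neg h1]
      simp only [mmGb, if_neg h1]
      by_cases h2 : mmMut cur.toList i g ∈ bankSet
      · by_cases h3 : mmMut cur.toList i g ∈ v
        · rw [if_neg (fun h => h.2 h3), if_pos h2]; simp [mmVisFold, h3]
        · rw [if_pos ⟨h2, h3⟩, if_pos h2]; simp [mmVisFold, h3]
      · rw [if_neg (fun h => h2 h.1), if_neg h2]; simp [mmVisFold]
  have hmid : ∀ (v : List String) (q : List (String × Int)) (i : Nat),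
      mmGenes.foldl (fun st g =>
        if g = cur.toList.getD i 'A' then st
        else
          let m := mmMut cur.toList i g
          if m ∈ bankSet ∧ m ∉ st.1 then (PySem.Set.add st.1 m, st.2 ++ [(m, steps + 1)])
          else st) (v, q) =
      ((mmVisFold (v, []) (mmGenes.flatMap (mmGb bankSet cur.toList i))).1,
        q ++ ((mmVisFold (v, []) (mmGenes.flatMap (mmGb bankSet cur.toList i))).2).map
          (fun m => (m, steps + 1))) := by
    intro v q i
    exact mmVisRel_fold _ _ _ (fun v q g => hinner i v q g) mmGenes v q
  rw [mmNbrs_eq]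
  unfold mmExpandA mmNbrL
  exact mmVisRel_fold _ _ _ (fun v q i => hmid v q i) (List.range cur.toList.length) v q

-- the lookup in the precomputed table
lemma mmAdj_getD (bankSet : List String) : ∀ (nodes : List String)
    (d : PySem.Dict String (List String)) (u : String),
    (nodes.foldl (fun d u => d.insert u (mmNbrs bankSet u)) d).getD u [] =
      if u ∈ nodes then mmNbrs bankSet u else d.getD u [] := by
  intro nodes
  induction nodes with
  | nil => intro d u; simp
  | cons w ns ih =>
    intro d u
    rw [List.foldl_cons, ih, PySem.Dict.getD_insert]
    by_cases h1 : u ∈ ns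
    · simp [h1, List.mem_cons]
    · by_cases h2 : u = w
      · subst h2; simp [h1]
      · simp [h1, h2]

lemma mmAdj_getD' (bankSet nodes : List String) (u : String) (hu : u ∈ nodes) :
    (mmAdj bankSet nodes).getD u [] = mmNbrs bankSet u := by
  unfold mmAdj
  rw [mmAdj_getD bankSet nodes PySem.Dict.empty u]
  simp [hu]

-- what one visited-filter pass adds: fresh distinct elements of ms, appended to both components
lemma mmVisFold_grow : ∀ (ms v n : List String), ∃ γ,
    mmVisFold (v, n) ms = (v ++ γ, n ++ γ) ∧ γ.Nodup ∧ ∀ x ∈ γ, x ∈ ms ∧ x ∉ v := by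
  intro ms
  induction ms with
  | nil => intro v n; exact ⟨[], by simp [mmVisFold]⟩
  | cons m ms ih =>
    intro v n
    by_cases hm : m ∈ v
    · have e1 : mmVisFold (v, n) (m :: ms) = mmVisFold (v, n) ms := by simp [mmVisFold, hm]
      obtain ⟨γ, hγ, hnd, hprop⟩ := ih v n
      exact ⟨γ, by rw [e1]; exact hγ, hnd, fun x hx =>
        ⟨List.mem_cons_of_mem _ (hprop x hx).1, (hprop x hx).2⟩⟩
    · have e1 : mmVisFold (v, n) (m :: ms) = mmVisFold (v ++ [m], n ++ [m]) ms := by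
        simp [mmVisFold, hm]
      obtain ⟨γ, hγ, hnd, hprop⟩ := ih (v ++ [m]) (n ++ [m])
      refine ⟨m :: γ, ?_, ?_, ?_⟩
      · rw [e1, hγ]; simp
      · exact List.nodup_cons.mpr ⟨fun hmem => by
          have := (hprop m hmem).2; simp [List.mem_append] at this, hnd⟩
      · intro x hx
        rcases List.mem_cons.mp hx with rfl | hx
        · exact ⟨List.mem_cons_self, hm⟩
        · refine ⟨List.mem_cons_of_mem _ (hprop x hx).1, fun hv => ?_⟩
          exact (hprop x hx).2 (by simp [List.mem_append, hv])

-- same for a whole level (all frontier genes are in the node table)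
lemma mmLevel_grow (startGene : String) (bank : List String) :
    ∀ (L : List String) (v n : List String), (∀ u ∈ L, u ∈ mmNodes startGene bank) →
    ∃ γ, mmLevel (mmAdj (PySem.Set.ofList bank) (mmNodes startGene bank)) L (v, n) = (v ++ γ, n ++ γ) ∧
      γ.Nodup ∧ ∀ x ∈ γ, x ∈ PySem.Set.ofList bank ∧ x ∉ v := by
  intro L
  induction L with
  | nil => intro v n _; exact ⟨[], by simp [mmLevel], List.nodup_nil, by simp⟩
  | cons u L ih =>
    intro v n hL
    have hu : u ∈ mmNodes startGene bank := hL u List.mem_cons_self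
    have hlook : (mmAdj (PySem.Set.ofList bank) (mmNodes startGene bank)).getD u [] =
        mmNbrs (PySem.Set.ofList bank) u := mmAdj_getD' _ _ _ hu
    have hstep : mmLevel (mmAdj (PySem.Set.ofList bank) (mmNodes startGene bank)) (u :: L) (v, n) =
        mmLevel (mmAdj (PySem.Set.ofList bank) (mmNodes startGene bank)) L
          (mmVisFold (v, n) (mmNbrs (PySem.Set.ofList bank) u)) := by
      simp [mmLevel, hlook]
    obtain ⟨γ₁, hγ₁, hnd₁, hp₁⟩ := mmVisFold_grow (mmNbrs (PySem.Set.ofList bank) u) v n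
    obtain ⟨γ₂, hγ₂, hnd₂, hp₂⟩ := ih (v ++ γ₁) (n ++ γ₁)
      (fun x hx => hL x (List.mem_cons_of_mem _ hx))
    refine ⟨γ₁ ++ γ₂, ?_, ?_, ?_⟩
    · rw [hstep, hγ₁, hγ₂]; simp [List.append_assoc]
    · refine List.nodup_append.mpr ⟨hnd₁, hnd₂, ?_⟩
      intro x hx₁ y hy₂ hxy
      exact (hp₂ y hy₂).2 (List.mem_append.mpr (.inr (hxy ▸ hx₁)))
    · intro x hx
      rcases List.mem_append.mp hx with hx | hx
      · exact ⟨mmNbrs_mem _ u x (hp₁ x hx).1, (hp₁ x hx).2⟩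
      · exact ⟨(hp₂ x hx).1, fun hv => (hp₂ x hx).2 (List.mem_append.mpr (.inl hv))⟩

-- discovering fresh bank genes decreases the undiscovered count by exactly their number
lemma mmUnd_step (bank v : List String) (m : String)
    (hm : m ∈ PySem.Set.ofList bank) (hv : m ∉ v) :
    mmUnd bank (v ++ [m]) + 1 = mmUnd bank v := by
  unfold mmUnd
  have h1 : (PySem.Set.ofList bank).filter (fun x => decide (x ∉ v ++ [m])) =
      ((PySem.Set.ofList bank).filter (fun x => decide (x ∉ v))).filter (fun x => x != m) := by
    rw [List.filter_filter]
    apply List.filter_congr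
    intro x _
    by_cases hx : x = m
    · subst hx; simp [hv]
    · simp [List.mem_append, hx]
  have hT : ((PySem.Set.ofList bank).filter (fun x => decide (x ∉ v))).Nodup :=
    (PySem.Set.nodup_ofList bank).filter _
  have hmT : m ∈ (PySem.Set.ofList bank).filter (fun x => decide (x ∉ v)) := by
    simp [List.mem_filter, hm, hv]
  rw [h1, ← List.Nodup.erase_eq_filter hT m, List.length_erase_of_mem hmT]
  have := List.length_pos_of_mem hmT
  omega

lemma mmUnd_chain (bank : List String) : ∀ (γ v : List String), γ.Nodup →
    (∀ x ∈ γ, x ∈ PySem.Set.ofList bank ∧ x ∉ v) →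
    mmUnd bank (v ++ γ) + γ.length = mmUnd bank v := by
  intro γ
  induction γ with
  | nil => intro v _ _; simp
  | cons m γ ih =>
    intro v hnd h
    have hm := h m List.mem_cons_self
    have hstep := mmUnd_step bank v m hm.1 hm.2
    have hrec := ih (v ++ [m]) (List.nodup_cons.mp hnd).2 (fun x hx => by
      refine ⟨(h x (List.mem_cons_of_mem _ hx)).1, ?_⟩
      intro hmem
      rcases List.mem_append.mp hmem with h' | h'
      · exact (h x (List.mem_cons_of_mem _ hx)).2 h'
      · exact (List.nodup_cons.mp hnd).1 (by simpa using (List.mem_singleton.mp h') ▸ hx))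
    have : v ++ m :: γ = (v ++ [m]) ++ γ := by simp
    rw [this]
    simp only [List.length_cons] at *
    omega

lemma mmUnd_le (bank v : List String) : mmUnd bank v ≤ bank.length :=
  le_trans (List.length_filter_le _ _) (PySem.Set.length_ofList_le bank)

lemma mmLoopB_nil (endGene : String) (adj : PySem.Dict String (List String)) :
    ∀ (fuel : Nat) (v : List String) (s : Int), mmLoopB endGene adj fuel [] v s = -1 := by
  intro fuel v s; cases fuel <;> rfl

-- THE SIMULATION: A's queue mid-level = remainder A₁ of the current level (depth s) followed
-- by the part Δ of the next level discovered so far; B stands at the same level.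
lemma mmSIM (startGene endGene : String) (bank : List String) :
    ∀ (fA : Nat) (A₁ Δ v : List String) (s : Int),
      (∀ x ∈ A₁, x ∈ mmNodes startGene bank) →
      (∀ x ∈ Δ, x ∈ mmNodes startGene bank) →
      A₁.length + Δ.length + mmUnd bank v ≤ fA →
      ∀ fB : Nat,
        1 + mmUnd bank (mmLevel (mmAdj (PySem.Set.ofList bank) (mmNodes startGene bank)) A₁ (v, Δ)).1 ≤ fB →
        mmLoopA endGene (PySem.Set.ofList bank) fA
            (A₁.map (fun u => (u, s)) ++ Δ.map (fun u => (u, s + 1))) v =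
          if endGene ∈ A₁ then s
          else mmLoopB endGene (mmAdj (PySem.Set.ofList bank) (mmNodes startGene bank)) fB
            (mmLevel (mmAdj (PySem.Set.ofList bank) (mmNodes startGene bank)) A₁ (v, Δ)).2
            (mmLevel (mmAdj (PySem.Set.ofList bank) (mmNodes startGene bank)) A₁ (v, Δ)).1
            (s + 1) := by
  intro fA
  induction fA with
  | zero =>
    intro A₁ Δ v s hA hΔ hfA fB hfB
    have h1 : A₁ = [] := List.length_eq_zero_iff.mp (by omega)
    have h2 : Δ = [] := List.length_eq_zero_iff.mp (by omega)
    subst h1; subst h2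
    simp [mmLoopA, mmLevel, mmLoopB_nil]
  | succ fuel ih =>
    intro A₁ Δ v s hA hΔ hfA fB hfB
    cases A₁ with
    | cons u rest =>
      have hu : u ∈ mmNodes startGene bank := hA u List.mem_cons_self
      obtain ⟨δ, hδeq, hδnd, hδp⟩ := mmVisFold_grow (mmNbrs (PySem.Set.ofList bank) u) v []
      rw [List.nil_append] at hδeq
      have hδbank : ∀ x ∈ δ, x ∈ PySem.Set.ofList bank ∧ x ∉ v := fun x hx =>
        ⟨mmNbrs_mem _ u x (hδp x hx).1, (hδp x hx).2⟩
      have hund := mmUnd_chain bank δ v hδnd hδbank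
      have hδnodes : ∀ x ∈ δ, x ∈ mmNodes startGene bank := by
        intro x hx
        have hxb := (PySem.Set.mem_ofList bank x).mp (hδbank x hx).1
        simp [mmNodes, PySem.List.dedup_eq_ofList, PySem.Set.mem_ofList, hxb]
      have hlev : mmLevel (mmAdj (PySem.Set.ofList bank) (mmNodes startGene bank)) (u :: rest) (v, Δ) =
          mmLevel (mmAdj (PySem.Set.ofList bank) (mmNodes startGene bank)) rest (v ++ δ, Δ ++ δ) := by
        simp only [mmLevel, List.foldl_cons]
        rw [mmAdj_getD' _ _ _ hu, mmVisFold_acc (mmNbrs (PySem.Set.ofList bank) u) (v, Δ)]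
        simp only [hδeq]
      by_cases hue : u = endGene
      · subst hue
        simp [mmLoopA, List.mem_cons]
      · have hne : ¬ endGene = u := fun h => hue h.symm
        have hfB' : 1 + mmUnd bank
            (mmLevel (mmAdj (PySem.Set.ofList bank) (mmNodes startGene bank)) rest (v ++ δ, Δ ++ δ)).1 ≤ fB := by
          rw [hlev] at hfB; exact hfB
        have ihh := ih rest (Δ ++ δ) (v ++ δ) s
          (fun x hx => hA x (List.mem_cons_of_mem _ hx))
          (fun x hx => by
            rcases List.mem_append.mp hx with h | h
            exacts [hΔ x h, hδnodes x h])
          (by simp only [List.length_cons, List.length_append] at hfA ⊢; omega)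
          fB hfB'
        rw [List.map_append, ← List.append_assoc] at ihh
        simp only [List.map_cons, List.cons_append, mmLoopA, if_neg hue, mmExpandA_eq, hδeq]
        rw [ihh, hlev]
        simp [List.mem_cons, hne]
    | nil =>
      cases Δ with
      | nil => simp [mmLoopA, mmLevel, mmLoopB_nil]
      | cons w Δr =>
        have hw : w ∈ mmNodes startGene bank := hΔ w List.mem_cons_self
        have hlev0 : mmLevel (mmAdj (PySem.Set.ofList bank) (mmNodes startGene bank)) [] (v, w :: Δr) =
            (v, w :: Δr) := rfl
        simp only [hlev0] at hfB
        cases fB with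
        | zero => omega
        | succ g =>
          obtain ⟨δ, hδeq, hδnd, hδp⟩ := mmVisFold_grow (mmNbrs (PySem.Set.ofList bank) w) v []
          rw [List.nil_append] at hδeq
          have hδbank : ∀ x ∈ δ, x ∈ PySem.Set.ofList bank ∧ x ∉ v := fun x hx =>
            ⟨mmNbrs_mem _ w x (hδp x hx).1, (hδp x hx).2⟩
          have hund := mmUnd_chain bank δ v hδnd hδbank
          have hδnodes : ∀ x ∈ δ, x ∈ mmNodes startGene bank := by
            intro x hx
            have hxb := (PySem.Set.mem_ofList bank x).mp (hδbank x hx).1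
            simp [mmNodes, PySem.List.dedup_eq_ofList, PySem.Set.mem_ofList, hxb]
          obtain ⟨γ, hγeq, hγnd, hγp⟩ := mmLevel_grow startGene bank Δr (v ++ δ) δ
            (fun x hx => hΔ x (List.mem_cons_of_mem _ hx))
          have hundγ := mmUnd_chain bank γ (v ++ δ) hγnd hγp
          have hlev1 : mmLevel (mmAdj (PySem.Set.ofList bank) (mmNodes startGene bank)) (w :: Δr) (v, []) =
              mmLevel (mmAdj (PySem.Set.ofList bank) (mmNodes startGene bank)) Δr (v ++ δ, δ) := by
            simp only [mmLevel, List.foldl_cons]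
            rw [mmAdj_getD' _ _ _ hw]
            simp only [hδeq]
          by_cases hwe : w = endGene
          · subst hwe
            simp [mmLoopA, mmLoopB, mmLevel, List.mem_cons]
          · have hne : ¬ endGene = w := fun h => hwe h.symm
            have hA' : ∀ x ∈ Δr, x ∈ mmNodes startGene bank :=
              fun x hx => hΔ x (List.mem_cons_of_mem _ hx)
            have hfuel : Δr.length + δ.length + mmUnd bank (v ++ δ) ≤ fuel := by
              simp only [List.length_nil, List.length_cons] at hfA; omega
            by_cases hX : δ ++ γ = []
            · have hδe : δ = [] := (List.append_eq_nil_iff.mp hX).1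
              have ihh := ih Δr δ (v ++ δ) (s + 1) hA' hδnodes hfuel
                (1 + mmUnd bank ((mmLevel (mmAdj (PySem.Set.ofList bank) (mmNodes startGene bank)) Δr (v ++ δ, δ)).1))
                le_rfl
              simp only [List.map_nil, List.nil_append, List.map_cons, mmLoopA, if_neg hwe,
                mmExpandA_eq, hδeq]
              rw [ihh]
              have hγe : γ = [] := (List.append_eq_nil_iff.mp hX).2
              simp only [hlev0, mmLoopB, hlev1, hγeq]
              simp [mmLoopB_nil, List.mem_cons, hne, hδe, hγe]
            · have hlen : (δ ++ γ).length ≠ 0 := fun h => hX (List.length_eq_zero_iff.mp h)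
              have hg : 1 + mmUnd bank (v ++ δ ++ γ) ≤ g := by
                simp only [List.length_append] at hlen ⊢
                omega
              have ihh := ih Δr δ (v ++ δ) (s + 1) hA' hδnodes hfuel g
                (by rw [hγeq]; exact hg)
              simp only [List.map_nil, List.nil_append, List.map_cons, mmLoopA, if_neg hwe,
                mmExpandA_eq, hδeq]
              rw [ihh]
              simp only [hlev0, mmLoopB, hlev1]
              simp [List.mem_cons, hne]

-- ===== VERDICT (by name: the statement is the Claim_ definition above) =====
theorem minMutation_bfs_spec : Claim_equal_minMutation_bfs := by
  intro startGene endGene bank _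
  unfold Spec_minMutation_bfs minMutation_bfs minMutation_bfs_alt
  by_cases hg : endGene ∈ PySem.Set.ofList bank
  · simp only [hg, if_pos]
    have h := mmSIM startGene endGene bank (bank.length + 2) [] [startGene] [startGene] (-1)
      (by simp) (by simp [mmNodes, PySem.List.dedup_eq_ofList, PySem.Set.mem_ofList])
      (by have := mmUnd_le bank [startGene]
          simp only [List.length_nil, List.length_cons]; omega)
      (bank.length + 2)
      (by have := mmUnd_le bank [startGene]
          show 1 + mmUnd bank [startGene] ≤ bank.length + 2; omega)
    simpa [mmLevel, mmNodes] using h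
  · simp [hg]
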